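-- pv_equiv track=rewrite | github.com/h-dragon93/Algorithm_with_Python | Sw_Expert_Academy_1208.py | solve
-- ===== SOURCE A (Python) =====
-- def solve(dump_count, boxes) :
--     for i in range(dump_count) :
--         max_index = boxes.index(max(boxes))
--         min_index = boxes.index(min(boxes))
--         boxes[max_index] -= 1
--         boxes[min_index] += 1
--         if max(boxes) - min(boxes) <= 1 :
--             break
--     return max(boxes) - min(boxes)
-- ===== SOURCE B (Python) =====
-- def solve(dump_count, boxes):
--     # Batched leveling on a sorted copy: instead of re-scanning for max/min each
--     # of the dump_count steps, move whole blocks of equal heights at once.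
--     # (Return-value equivalence only: A mutates `boxes` in place, B does not.)
--     s = sorted(boxes)
--     n = len(s)
--     k = dump_count
--     while k > 0 and s[-1] - s[0] > 1:
--         m = s[0]
--         M = s[-1]
--         cm = s.count(m)
--         cM = s.count(M)
--         t = min(k, cm, cM)
--         s[cm - t:cm] = [m + 1] * t
--         s[n - cM:n - cM + t] = [M - 1] * t
--         k -= t
--     return s[-1] - s[0]
-- ===== Notes on version B (the rewrite author's own statement) =====
-- stated objective: faster
-- what changed: Instead of re-scanning the whole list for max/min/index on each of the dump_count steps and moving one box at a time, B sorts the list once and then moves whole blocks of equal-height boxes per iteration (t = min(k, count(min), count(max)) boxes at once via slice assignment), so the number of loop iterations is bounded by the number of height levels instead of by dump_count.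
import Mathlib
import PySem

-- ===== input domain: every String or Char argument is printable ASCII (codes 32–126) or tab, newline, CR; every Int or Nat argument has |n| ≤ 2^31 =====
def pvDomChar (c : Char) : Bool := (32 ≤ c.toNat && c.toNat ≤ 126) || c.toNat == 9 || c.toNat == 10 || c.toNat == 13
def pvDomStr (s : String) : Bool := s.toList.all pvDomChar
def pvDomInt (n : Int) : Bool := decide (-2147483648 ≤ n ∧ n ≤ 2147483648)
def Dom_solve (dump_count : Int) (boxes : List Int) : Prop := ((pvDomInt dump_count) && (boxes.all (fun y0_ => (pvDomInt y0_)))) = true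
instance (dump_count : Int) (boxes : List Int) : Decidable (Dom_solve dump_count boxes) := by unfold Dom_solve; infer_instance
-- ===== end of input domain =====

-- B batches the per-step leveling of A into block moves on a sorted copy; return-value
-- equivalence only: A mutates `boxes` in place, B does not.

-- ===== PORT A =====
-- max(boxes) - min(boxes)
def solveSpread (bs : List Int) : Int :=
  (PySem.List.max? bs (fun x => x)).getD 0 - (PySem.List.min? bs (fun x => x)).getD 0

-- one body of A's for-loop: boxes[boxes.index(max)] -= 1; boxes[boxes.index(min)] += 1
def solveStep (bs : List Int) : List Int :=
  match PySem.List.max? bs (fun x => x), PySem.List.min? bs (fun x => x) with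
  | some M, some m =>
    match PySem.List.index? bs M, PySem.List.index? bs m with
    | some i, some j =>
      let bs1 := bs.set i ((bs[i]?).getD 0 - 1)
      bs1.set j ((bs1[j]?).getD 0 + 1)
    | _, _ => bs
  | _, _ => bs

-- for i in range(dump_count): … if max-min <= 1: break
def solveLoop : Nat → List Int → List Int
  | 0, bs => bs
  | k+1, bs =>
    let bs' := solveStep bs
    if solveSpread bs' ≤ 1 then bs' else solveLoop k bs'

def solve (dump_count : Int) (boxes : List Int) : Int :=
  solveSpread (solveLoop dump_count.toNat boxes)

-- ===== PORT B =====
-- while k > 0 and s[-1] - s[0] > 1: move t boxes from the max block to the min block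
def solveAltLoop (k : Nat) (s : List Int) : List Int :=
  if hk : k = 0 then s
  else
    match hM : PySem.List.pyGet? s (-1), hm : PySem.List.pyGet? s (0 : Int) with
    | some M, some m =>
      if M - m ≤ 1 then s
      else
        let cm := PySem.List.count s m
        let cM := PySem.List.count s M
        let t := min k (min cm cM)
        let s1 := s.take (cm - t) ++ List.replicate t (m + 1) ++ s.drop cm
        let s2 := s1.take (s.length - cM) ++ List.replicate t (M - 1) ++
                  s1.drop (s.length - cM + t)
        solveAltLoop (k - t) s2
    | _, _ => s        -- totality guard: s[-1] on an empty list raises in Python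
termination_by k
decreasing_by
  have hcm : 0 < PySem.List.count s m := by
    rw [PySem.List.count_eq, List.count_pos_iff]
    exact PySem.List.mem_of_pyGet?_eq_some _ hm
  have hcM : 0 < PySem.List.count s M := by
    rw [PySem.List.count_eq, List.count_pos_iff]
    exact PySem.List.mem_of_pyGet?_eq_some _ hM
  omega

def solve_alt (dump_count : Int) (boxes : List Int) : Int :=
  let s := PySem.List.sorted boxes (fun x => x) false
  let f := solveAltLoop dump_count.toNat s
  (PySem.List.pyGet? f (-1)).getD 0 - (PySem.List.pyGet? f (0 : Int)).getD 0

-- ===== PRECONDITION & SPEC =====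
-- Pre_ excludes only the empty list, on which A raises ValueError (max() of empty).
def Pre_solve (dump_count : Int) (boxes : List Int) : Prop := boxes ≠ []
instance (dump_count : Int) (boxes : List Int) : Decidable (Pre_solve dump_count boxes) := by unfold Pre_solve; infer_instance
def pvWitness_solve : Int × List Int := (3, [1, 5, 2])

def Spec_solve (dump_count : Int) (boxes : List Int) (out : Int) : Prop := out = solve_alt dump_count boxes
instance (dump_count : Int) (boxes : List Int) (out : Int) : Decidable (Spec_solve dump_count boxes out) := by unfold Spec_solve; infer_instance

-- ===== CLAIM (what is proved, stated in full; the proofs are below) =====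
def Claim_equal_solve : Prop := ∀ (dump_count : Int) (boxes : List Int), Dom_solve dump_count boxes → Pre_solve dump_count boxes → Spec_solve dump_count boxes (solve dump_count boxes)

-- ===== LEMMAS AND PROOFS =====

-- value of max(bs) / min(bs) as used by the ports
def maxV (bs : List Int) : Int := (PySem.List.max? bs (fun x => x)).getD 0
def minV (bs : List Int) : Int := (PySem.List.min? bs (fun x => x)).getD 0

theorem spread_eq (bs : List Int) : solveSpread bs = maxV bs - minV bs := rfl

theorem maxV_mem (bs : List Int) (h : bs ≠ []) : maxV bs ∈ bs ∧ ∀ x ∈ bs, x ≤ maxV bs := by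
  cases bs with
  | nil => exact absurd rfl h
  | cons x t =>
    rw [maxV, PySem.List.max?_id_cons]
    refine ⟨?_, ?_⟩
    · rcases PySem.List.foldl_max_mem t x with h1 | h1
      · simp [h1]
      · simp [h1]
    · intro y hy
      rcases List.mem_cons.1 hy with rfl | hy
      · simpa using (PySem.List.le_foldl_max t y).1
      · simpa using (PySem.List.le_foldl_max t x).2 y hy

theorem minV_mem (bs : List Int) (h : bs ≠ []) : minV bs ∈ bs ∧ ∀ x ∈ bs, minV bs ≤ x := by
  cases bs with
  | nil => exact absurd rfl h
  | cons x t =>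
    rw [minV, PySem.List.min?_id_cons]
    refine ⟨?_, ?_⟩
    · rcases PySem.List.foldl_min_mem t x with h1 | h1
      · simp [h1]
      · simp [h1]
    · intro y hy
      rcases List.mem_cons.1 hy with rfl | hy
      · simpa using (PySem.List.foldl_min_le t y).1
      · simpa using (PySem.List.foldl_min_le t x).2 y hy

theorem maxV_eq {bs : List Int} {M : Int} (h : bs ≠ []) (h1 : M ∈ bs)
    (h2 : ∀ x ∈ bs, x ≤ M) : maxV bs = M :=
  le_antisymm (h2 _ (maxV_mem bs h).1) ((maxV_mem bs h).2 M h1)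

theorem minV_eq {bs : List Int} {m : Int} (h : bs ≠ []) (h1 : m ∈ bs)
    (h2 : ∀ x ∈ bs, m ≤ x) : minV bs = m :=
  le_antisymm ((minV_mem bs h).2 m h1) (h2 _ (minV_mem bs h).1)

theorem minV_le_maxV {bs : List Int} (h : bs ≠ []) : minV bs ≤ maxV bs :=
  (maxV_mem bs h).2 _ (minV_mem bs h).1

theorem maxV_perm {s bs : List Int} (hp : s.Perm bs) (h : bs ≠ []) : maxV s = maxV bs := by
  have hs : s ≠ [] := by intro h0; subst h0; exact h (List.Perm.eq_nil hp.symm)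
  exact maxV_eq hs (hp.mem_iff.2 (maxV_mem bs h).1)
    (fun x hx => (maxV_mem bs h).2 x (hp.mem_iff.1 hx))

theorem minV_perm {s bs : List Int} (hp : s.Perm bs) (h : bs ≠ []) : minV s = minV bs := by
  have hs : s ≠ [] := by intro h0; subst h0; exact h (List.Perm.eq_nil hp.symm)
  exact minV_eq hs (hp.mem_iff.2 (minV_mem bs h).1)
    (fun x hx => (minV_mem bs h).2 x (hp.mem_iff.1 hx))

theorem spread_perm {s bs : List Int} (hp : s.Perm bs) (h : bs ≠ []) :
    solveSpread s = solveSpread bs := by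
  rw [spread_eq, spread_eq, maxV_perm hp h, minV_perm hp h]

theorem count_add_count_le_length {a b : Int} (h : a ≠ b) (l : List Int) :
    l.count a + l.count b ≤ l.length := by
  induction l with
  | nil => simp
  | cons x t ih =>
    simp only [List.count_cons, List.length_cons, beq_iff_eq]
    by_cases hx : x = a <;> by_cases hy : x = b <;> simp_all <;> omega

theorem max?_eq_some {bs : List Int} (h : bs ≠ []) :
    PySem.List.max? bs (fun x => x) = some (maxV bs) := by
  cases hx : PySem.List.max? bs (fun x => x) with
  | none => exact absurd ((PySem.List.max?_eq_none_iff bs _).1 hx) h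
  | some a => simp [maxV, hx]

theorem min?_eq_some {bs : List Int} (h : bs ≠ []) :
    PySem.List.min? bs (fun x => x) = some (minV bs) := by
  cases hx : PySem.List.min? bs (fun x => x) with
  | none => exact absurd ((PySem.List.min?_eq_none_iff bs _).1 hx) h
  | some a => simp [minV, hx]

theorem index_data {bs : List Int} {v : Int} (hv : v ∈ bs) :
    ∃ i, PySem.List.index? bs v = some i ∧ ∃ (hi : i < bs.length), bs[i] = v := by
  have h1 : (PySem.List.index? bs v).isSome := (PySem.List.index?_isSome_iff bs v).2 hv
  obtain ⟨i, hi⟩ := Option.isSome_iff_exists.1 h1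
  obtain ⟨hlt, heq, _⟩ := PySem.List.getElem_of_index?_eq_some hi
  exact ⟨i, hi, hlt, heq⟩

theorem step_eq_self {bs : List Int} (h : bs ≠ []) (heq : maxV bs = minV bs) :
    solveStep bs = bs := by
  obtain ⟨i, hi, hlt, hbi⟩ := index_data (maxV_mem bs h).1
  have hj : PySem.List.index? bs (minV bs) = some i := by rw [← heq]; exact hi
  simp only [solveStep, max?_eq_some h, min?_eq_some h, hi, hj]
  have h1 : bs[i]? = some (maxV bs) := by rw [List.getElem?_eq_getElem hlt, hbi]
  rw [h1]
  simp only [Option.getD_some]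
  have h2 : (bs.set i (maxV bs - 1))[i]? = some (maxV bs - 1) := by
    rw [List.getElem?_eq_getElem (by simpa using hlt)]
    simp
  rw [h2]
  simp only [Option.getD_some]
  have : maxV bs - 1 + 1 = maxV bs := by ring
  rw [List.set_set, this, ← hbi, List.set_getElem_self]

theorem step_count {bs : List Int} (h : bs ≠ []) (hne : maxV bs ≠ minV bs) (c : Int) :
    (solveStep bs).count c + (if c = maxV bs then 1 else 0) + (if c = minV bs then 1 else 0)
      = bs.count c + (if c = maxV bs - 1 then 1 else 0) + (if c = minV bs + 1 then 1 else 0) := by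
  obtain ⟨i, hi, hlti, hbi⟩ := index_data (maxV_mem bs h).1
  obtain ⟨j, hj, hltj, hbj⟩ := index_data (minV_mem bs h).1
  have hij : i ≠ j := by intro h0; subst h0; exact hne (hbi.symm.trans hbj)
  simp only [solveStep, max?_eq_some h, min?_eq_some h, hi, hj]
  have h1 : bs[i]? = some (maxV bs) := by rw [List.getElem?_eq_getElem hlti, hbi]
  rw [h1]
  simp only [Option.getD_some]
  have h2 : (bs.set i (maxV bs - 1))[j]? = some (minV bs) := by
    rw [List.getElem?_eq_getElem (by simpa using hltj)]
    rw [List.getElem_set_ne (by omega)]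
    exact congrArg some hbj
  rw [h2]
  simp only [Option.getD_some]
  have hc1 := List.count_set (a := maxV bs - 1) (b := c) (l := bs) hlti
  have hc2 := List.count_set (a := minV bs + 1) (b := c) (l := bs.set i (maxV bs - 1))
    (i := j) (by simpa using hltj)
  rw [List.getElem_set_ne (by omega), hbj] at hc2
  rw [hbi] at hc1
  have hMp : 0 < bs.count (maxV bs) := List.count_pos_iff.2 (maxV_mem bs h).1
  have hmp : 0 < bs.count (minV bs) := List.count_pos_iff.2 (minV_mem bs h).1
  simp only [beq_iff_eq] at hc1 hc2
  rw [hc2, hc1]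
  clear hc1 hc2 h1 h2 hi hj
  rcases eq_or_ne c (maxV bs) with rfl | e1
  · split_ifs <;> omega
  · rcases eq_or_ne c (minV bs) with rfl | e2
    · split_ifs <;> omega
    · split_ifs <;> omega

theorem step_length (bs : List Int) : (solveStep bs).length = bs.length := by
  unfold solveStep
  repeat' split
  all_goals simp

theorem step_ne_nil {bs : List Int} (h : bs ≠ []) : solveStep bs ≠ [] := by
  intro h0
  have := step_length bs
  rw [h0] at this
  cases bs with
  | nil => exact h rfl
  | cons x t => simp at this

theorem step_perm_le_one {bs : List Int} (h : bs ≠ []) (hsp : maxV bs - minV bs ≤ 1) :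
    (solveStep bs).Perm bs := by
  by_cases heq : maxV bs = minV bs
  · rw [step_eq_self h heq]
  · have hle := minV_le_maxV h
    have hM : maxV bs = minV bs + 1 := by omega
    rw [List.perm_iff_count]
    intro c
    have := step_count h heq c
    rw [hM] at this
    have e1 : minV bs + 1 - 1 = minV bs := by ring
    rw [e1] at this
    split_ifs at this <;> omega

theorem loop_spread_le_one {bs : List Int} (h : bs ≠ []) (hsp : solveSpread bs ≤ 1)
    (k : Nat) : solveSpread (solveLoop k bs) = solveSpread bs := by
  cases k with
  | zero => rfl
  | succ k =>
    have hperm : (solveStep bs).Perm bs := by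
      apply step_perm_le_one h
      rw [spread_eq] at hsp; exact hsp
    have hsp' : solveSpread (solveStep bs) = solveSpread bs := spread_perm hperm h
    simp only [solveLoop]
    rw [if_pos (by rw [hsp']; exact hsp)]
    exact hsp'

theorem loop_unfold {bs : List Int} (hsp : ¬ solveSpread (solveStep bs) ≤ 1) (k : Nat) :
    solveLoop (k + 1) bs = solveLoop k (solveStep bs) := by
  simp only [solveLoop]
  rw [if_neg hsp]

-- sorted-list facts
theorem sorted_head_le {s : List Int} (hs : List.Pairwise (· ≤ ·) s) (hne : s ≠ [])
    {x : Int} (hx : x ∈ s) : s.head hne ≤ x := by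
  obtain ⟨i, hi, rfl⟩ := List.mem_iff_getElem.1 hx
  rw [List.head_eq_getElem]
  rcases Nat.eq_zero_or_pos i with rfl | hpos
  · exact le_refl _
  · exact (List.pairwise_iff_getElem.1 hs) 0 i (by omega) hi hpos

theorem sorted_le_getLast {s : List Int} (hs : List.Pairwise (· ≤ ·) s) (hne : s ≠ [])
    {x : Int} (hx : x ∈ s) : x ≤ s.getLast hne := by
  obtain ⟨i, hi, rfl⟩ := List.mem_iff_getElem.1 hx
  rw [List.getLast_eq_getElem]
  rcases Nat.lt_or_ge i (s.length - 1) with hlt | hge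
  · exact (List.pairwise_iff_getElem.1 hs) i (s.length - 1) (by omega) (by omega) hlt
  · have : i = s.length - 1 := by omega
    subst this; exact le_refl _

theorem minV_sorted {s : List Int} (hs : List.Pairwise (· ≤ ·) s) (hne : s ≠ []) :
    minV s = s.head hne :=
  minV_eq hne (List.head_mem hne) (fun x hx => sorted_head_le hs hne hx)

theorem maxV_sorted {s : List Int} (hs : List.Pairwise (· ≤ ·) s) (hne : s ≠ []) :
    maxV s = s.getLast hne :=
  maxV_eq hne (List.getLast_mem hne) (fun x hx => sorted_le_getLast hs hne hx)

-- the value solve_alt reads off a final list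
def solveAltVal (f : List Int) : Int :=
  (PySem.List.pyGet? f (-1)).getD 0 - (PySem.List.pyGet? f (0 : Int)).getD 0

theorem pyGet_last {s : List Int} (hne : s ≠ []) :
    PySem.List.pyGet? s (-1) = some (s.getLast hne) := by
  rw [PySem.List.pyGet?_neg_one, List.getLast?_eq_some_getLast]

theorem pyGet_head {s : List Int} (hne : s ≠ []) :
    PySem.List.pyGet? s (0 : Int) = some (s.head hne) := by
  rw [PySem.List.pyGet?_zero, List.getElem?_eq_getElem (by
    cases s with | nil => exact absurd rfl hne | cons x t => simp)]
  rw [List.getElem_zero_eq_head]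

theorem solveAltVal_sorted {s : List Int} (hs : List.Pairwise (· ≤ ·) s) (hne : s ≠ []) :
    solveAltVal s = solveSpread s := by
  rw [solveAltVal, pyGet_last hne, pyGet_head hne, spread_eq,
    maxV_sorted hs hne, minV_sorted hs hne]
  rfl

theorem altLoop_stop {s : List Int} (hne : s ≠ []) (k : Nat)
    (h : s.getLast hne - s.head hne ≤ 1) : solveAltLoop k s = s := by
  rw [solveAltLoop]
  rcases Nat.eq_zero_or_pos k with rfl | hk
  · simp
  · rw [dif_neg (by omega)]
    rw [pyGet_last hne, pyGet_head hne]
    simp only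
    rw [if_pos h]


-- a sorted list with lower bound m starts with count-m copies of m
theorem prefix_rep {m : Int} : ∀ {s : List Int}, List.Pairwise (· ≤ ·) s → (∀ x ∈ s, m ≤ x) →
    s.take (s.count m) = List.replicate (s.count m) m ∧ m ∉ s.drop (s.count m) := by
  intro s
  induction s with
  | nil => simp
  | cons x t ih =>
    intro hp hlb
    by_cases hx : x = m
    · subst hx
      rw [List.count_cons_self]
      obtain ⟨ih1, ih2⟩ := ih hp.of_cons (fun y hy => hlb y (List.mem_cons_of_mem _ hy))
      constructor
      · rw [List.take_succ_cons, ih1, List.replicate_succ]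
      · rw [List.drop_succ_cons]; exact ih2
    · have hxm : m < x := lt_of_le_of_ne (hlb x List.mem_cons_self) (Ne.symm hx)
      have hmt : m ∉ t := fun hmem =>
        absurd (List.rel_of_pairwise_cons hp hmem) (by omega)
      have hc : (x :: t).count m = 0 := by
        rw [List.count_eq_zero]
        simp only [List.mem_cons, not_or]
        exact ⟨Ne.symm (by omega), hmt⟩
      rw [hc]
      simp only [List.take_zero, List.replicate_zero, List.drop_zero, true_and]
      simp only [List.mem_cons, not_or]
      exact ⟨Ne.symm (by omega), hmt⟩

-- the reverse-order twin
theorem prefix_rep' {M : Int} : ∀ {s : List Int}, List.Pairwise (fun a b => b ≤ a) s →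
    (∀ x ∈ s, x ≤ M) →
    s.take (s.count M) = List.replicate (s.count M) M ∧ M ∉ s.drop (s.count M) := by
  intro s
  induction s with
  | nil => simp
  | cons x t ih =>
    intro hp hub
    by_cases hx : x = M
    · subst hx
      rw [List.count_cons_self]
      obtain ⟨ih1, ih2⟩ := ih hp.of_cons (fun y hy => hub y (List.mem_cons_of_mem _ hy))
      constructor
      · rw [List.take_succ_cons, ih1, List.replicate_succ]
      · rw [List.drop_succ_cons]; exact ih2
    · have hxm : x < M := lt_of_le_of_ne (hub x List.mem_cons_self) hx
      have hmt : M ∉ t := fun hmem =>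
        absurd (List.rel_of_pairwise_cons hp hmem) (by omega)
      have hc : (x :: t).count M = 0 := by
        rw [List.count_eq_zero]
        simp only [List.mem_cons, not_or]
        exact ⟨Ne.symm (by omega), hmt⟩
      rw [hc]
      simp only [List.take_zero, List.replicate_zero, List.drop_zero, true_and]
      simp only [List.mem_cons, not_or]
      exact ⟨Ne.symm (by omega), hmt⟩

theorem suffix_rep {M : Int} {s : List Int} (hs : List.Pairwise (· ≤ ·) s)
    (hub : ∀ x ∈ s, x ≤ M) :
    s.drop (s.length - s.count M) = List.replicate (s.count M) M ∧
      M ∉ s.take (s.length - s.count M) := by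
  have hr : List.Pairwise (fun a b => b ≤ a) s.reverse := List.pairwise_reverse.2 hs
  have hub' : ∀ x ∈ s.reverse, x ≤ M := by simpa using hub
  obtain ⟨h1, h2⟩ := prefix_rep' hr hub'
  rw [List.count_reverse] at h1 h2
  constructor
  · rw [List.take_reverse] at h1
    have h3 := congrArg List.reverse h1
    rw [List.reverse_reverse, List.reverse_replicate] at h3
    exact h3
  · intro hmem
    apply h2
    rw [List.drop_reverse, List.mem_reverse]
    exact hmem

-- the leveling state: cm-u copies of m, u raised to m+1, middle, u lowered to M-1, cM-u copies of M
def Su (m M : Int) (cm cM : Nat) (mid : List Int) (u : Nat) : List Int :=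
  List.replicate (cm - u) m ++ (List.replicate u (m + 1) ++
    (mid ++ (List.replicate u (M - 1) ++ List.replicate (cM - u) M)))

theorem Su_length {m M : Int} {cm cM : Nat} {mid : List Int} {u : Nat}
    (hu1 : u ≤ cm) (hu2 : u ≤ cM) :
    (Su m M cm cM mid u).length = cm + mid.length + cM := by
  simp [Su]; omega

theorem Su_ne_nil {m M : Int} {cm cM : Nat} {mid : List Int} {u : Nat}
    (hu1 : u ≤ cm) (hu2 : u ≤ cM) (hcm : 0 < cm) : Su m M cm cM mid u ≠ [] := by
  intro h0
  have h1 := Su_length (m := m) (M := M) (mid := mid) hu1 hu2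
  rw [h0] at h1
  simp at h1
  omega

theorem Su_sorted {m M : Int} {cm cM : Nat} {mid : List Int} {u : Nat}
    (hmid : ∀ x ∈ mid, m + 1 ≤ x ∧ x ≤ M - 1) (hmids : List.Pairwise (· ≤ ·) mid)
    (h2 : m + 2 ≤ M) : List.Pairwise (· ≤ ·) (Su m M cm cM mid u) := by
  simp only [Su, List.pairwise_append, List.pairwise_replicate, List.mem_append,
    List.mem_replicate]
  refine ⟨Or.inr le_rfl, ⟨Or.inr le_rfl, ⟨hmids, ⟨Or.inr le_rfl, Or.inr le_rfl, ?_⟩, ?_⟩,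
    ?_⟩, ?_⟩
  · rintro a ⟨_, rfl⟩ b ⟨_, rfl⟩
    omega
  · rintro a ha b (⟨_, rfl⟩ | ⟨_, rfl⟩) <;> have := hmid a ha <;> omega
  · rintro a ⟨_, rfl⟩ b (hb | ⟨_, rfl⟩ | ⟨_, rfl⟩)
    · have := hmid b hb; omega
    · omega
    · omega
  · rintro a ⟨_, rfl⟩ b (⟨_, rfl⟩ | hb | ⟨_, rfl⟩ | ⟨_, rfl⟩)
    · omega
    · have := hmid b hb; omega
    · omega
    · omega

theorem Su_mem_bounds {m M : Int} {cm cM : Nat} {mid : List Int} {u : Nat}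
    (hmid : ∀ x ∈ mid, m + 1 ≤ x ∧ x ≤ M - 1) (h2 : m + 2 ≤ M) :
    ∀ x ∈ Su m M cm cM mid u, m ≤ x ∧ x ≤ M := by
  intro x hx
  simp only [Su, List.mem_append, List.mem_replicate] at hx
  rcases hx with ⟨_, rfl⟩ | ⟨_, rfl⟩ | hmb | ⟨_, rfl⟩ | ⟨_, rfl⟩
  · omega
  · omega
  · have := hmid x hmb; omega
  · omega
  · omega

theorem Su_min_max {m M : Int} {cm cM : Nat} {mid : List Int} {u : Nat}
    (hmid : ∀ x ∈ mid, m + 1 ≤ x ∧ x ≤ M - 1) (h2 : m + 2 ≤ M)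
    (hu1 : u < cm) (hu2 : u < cM) :
    minV (Su m M cm cM mid u) = m ∧ maxV (Su m M cm cM mid u) = M := by
  have hne : Su m M cm cM mid u ≠ [] := Su_ne_nil (by omega) (by omega) (by omega)
  have hmmem : m ∈ Su m M cm cM mid u :=
    List.mem_append_left _ (List.mem_replicate.2 ⟨by omega, rfl⟩)
  have hMmem : M ∈ Su m M cm cM mid u :=
    List.mem_append_right _ (List.mem_append_right _ (List.mem_append_right _
      (List.mem_append_right _ (List.mem_replicate.2 ⟨by omega, rfl⟩))))
  constructor
  · exact minV_eq hne hmmem (fun x hx => (Su_mem_bounds hmid h2 x hx).1)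
  · exact maxV_eq hne hMmem (fun x hx => (Su_mem_bounds hmid h2 x hx).2)

theorem Su_succ_count {m M : Int} {cm cM : Nat} {mid : List Int} {u : Nat}
    (hu1 : u + 1 ≤ cm) (hu2 : u + 1 ≤ cM) (c : Int) :
    (Su m M cm cM mid (u + 1)).count c + (if c = M then 1 else 0) + (if c = m then 1 else 0)
      = (Su m M cm cM mid u).count c + (if c = M - 1 then 1 else 0) +
        (if c = m + 1 then 1 else 0) := by
  simp only [Su, List.count_append, List.count_replicate, beq_iff_eq]
  split_ifs <;> omega

theorem sorted_decomp {s : List Int} (hs : List.Pairwise (· ≤ ·) s) (hne : s ≠ [])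
    (hneq : s.head hne ≠ s.getLast hne) :
    ∃ mid, s = Su (s.head hne) (s.getLast hne) (s.count (s.head hne))
        (s.count (s.getLast hne)) mid 0 ∧
      (∀ x ∈ mid, s.head hne + 1 ≤ x ∧ x ≤ s.getLast hne - 1) ∧
      List.Pairwise (· ≤ ·) mid ∧
      s.length = s.count (s.head hne) + mid.length + s.count (s.getLast hne) := by
  obtain ⟨h1, h1'⟩ := prefix_rep (m := s.head hne) hs (fun x hx => sorted_head_le hs hne hx)
  obtain ⟨h2, h2'⟩ := suffix_rep (M := s.getLast hne) hs (fun x hx => sorted_le_getLast hs hne hx)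
  have hsum : s.count (s.head hne) + s.count (s.getLast hne) ≤ s.length :=
    count_add_count_le_length hneq s
  set m := s.head hne
  set M := s.getLast hne
  set cm := s.count m with hcmdef
  set cM := s.count M with hcMdef
  set n := s.length with hndef
  refine ⟨(s.drop cm).take (n - cM - cm), ?_, ?_, ?_, ?_⟩
  · -- decomposition equation
    have e1 : s.drop cm = (s.drop cm).take (n - cM - cm) ++ s.drop (n - cM) := by
      conv_lhs => rw [← List.take_append_drop (n - cM - cm) (s.drop cm)]
      rw [List.drop_drop]
      congr 2
      omega
    have e0 : s = s.take cm ++ s.drop cm := (List.take_append_drop cm s).symm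
    rw [Su]
    simp only [Nat.sub_zero, List.replicate_zero, List.nil_append]
    conv_lhs => rw [e0, e1]
    rw [h1, h2]
  · intro x hx
    have hxd : x ∈ s.drop cm := List.mem_of_mem_take hx
    have hxs : x ∈ s := List.mem_of_mem_drop hxd
    have hlb : m ≤ x := sorted_head_le hs hne hxs
    have hub : x ≤ M := sorted_le_getLast hs hne hxs
    have hxm : x ≠ m := fun h0 => h1' (h0 ▸ hxd)
    have hxM : x ≠ M := by
      intro h0
      apply h2'
      subst h0
      -- x ∈ take (n - cM) s
      have : (s.drop cm).take (n - cM - cm) = (s.take (n - cM)).drop cm := by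
        rw [List.drop_take]
      rw [this] at hx
      exact List.mem_of_mem_drop hx
    omega
  · exact List.Pairwise.sublist (List.Sublist.trans (List.take_sublist _ _) (List.drop_sublist _ _)) hs
  · have : ((s.drop cm).take (n - cM - cm)).length = n - cM - cm := by
      rw [List.length_take, List.length_drop]
      omega
    rw [this]
    omega

theorem update_eq_Su (m M : Int) (cm cM : Nat) (mid : List Int) (t : Nat)
    (ht1 : t ≤ cm) (ht2 : t ≤ cM) :
    ((Su m M cm cM mid 0).take (cm - t) ++ List.replicate t (m + 1) ++
        (Su m M cm cM mid 0).drop cm).take ((Su m M cm cM mid 0).length - cM) ++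
      List.replicate t (M - 1) ++
      ((Su m M cm cM mid 0).take (cm - t) ++ List.replicate t (m + 1) ++
        (Su m M cm cM mid 0).drop cm).drop ((Su m M cm cM mid 0).length - cM + t)
      = Su m M cm cM mid t := by
  have h0 : Su m M cm cM mid 0 = List.replicate cm m ++ (mid ++ List.replicate cM M) := by
    simp [Su]
  rw [h0]
  have l1 : (List.replicate cm m ++ (mid ++ List.replicate cM M)).take (cm - t)
      = List.replicate (cm - t) m := by
    rw [List.take_append, List.take_replicate, List.length_replicate]
    have e1 : min (cm - t) cm = cm - t := by omega
    have e2 : cm - t - cm = 0 := by omega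
    rw [e1, e2]
    simp
  have l2 : (List.replicate cm m ++ (mid ++ List.replicate cM M)).drop cm
      = mid ++ List.replicate cM M := by
    rw [List.drop_append, List.drop_replicate, List.length_replicate]
    simp
  have hlen : (List.replicate cm m ++ (mid ++ List.replicate cM M)).length
      = cm + (mid.length + cM) := by simp
  rw [l1, l2, hlen]
  have hassoc : List.replicate (cm - t) m ++ List.replicate t (m + 1) ++
      (mid ++ List.replicate cM M)
      = (List.replicate (cm - t) m ++ List.replicate t (m + 1) ++ mid) ++
        List.replicate cM M := by
    simp [List.append_assoc]
  rw [hassoc]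
  have hplen : (List.replicate (cm - t) m ++ List.replicate t (m + 1) ++ mid).length
      = cm + (mid.length + cM) - cM := by
    simp
    omega
  have l3 : ((List.replicate (cm - t) m ++ List.replicate t (m + 1) ++ mid) ++
      List.replicate cM M).take (cm + (mid.length + cM) - cM)
      = List.replicate (cm - t) m ++ List.replicate t (m + 1) ++ mid :=
    List.take_left' hplen
  have l4 : ((List.replicate (cm - t) m ++ List.replicate t (m + 1) ++ mid) ++
      List.replicate cM M).drop (cm + (mid.length + cM) - cM + t)
      = List.replicate (cM - t) M := by
    rw [List.drop_append, List.drop_replicate, hplen]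
    have e3 : cm + (mid.length + cM) - cM + t - (cm + (mid.length + cM) - cM) = t := by omega
    rw [e3]
    have e4 : (List.replicate (cm - t) m ++ List.replicate t (m + 1) ++ mid).drop
        (cm + (mid.length + cM) - cM + t) = [] := by
      apply List.drop_eq_nil_of_le
      rw [hplen]
      omega
    rw [e4]
    simp
  rw [l3, l4]
  simp [Su, List.append_assoc]

theorem altLoop_unfold {k : Nat} {s : List Int} (hk : k ≠ 0)
    {m M : Int} (hm : PySem.List.pyGet? s (0 : Int) = some m)
    (hM : PySem.List.pyGet? s (-1) = some M)
    (hgt : ¬(M - m ≤ 1)) {cm cM t : Nat} (hcm : PySem.List.count s m = cm)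
    (hcM : PySem.List.count s M = cM) (ht : min k (min cm cM) = t) :
    solveAltLoop k s = solveAltLoop (k - t)
      ((s.take (cm - t) ++ List.replicate t (m + 1) ++ s.drop cm).take (s.length - cM) ++
        List.replicate t (M - 1) ++
        (s.take (cm - t) ++ List.replicate t (m + 1) ++ s.drop cm).drop
          (s.length - cM + t)) := by
  rw [solveAltLoop, dif_neg hk]
  split
  · rename_i M' m' hM' hm'
    rw [hM] at hM'
    rw [hm] at hm'
    obtain rfl : M = M' := Option.some.inj hM'
    obtain rfl : m = m' := Option.some.inj hm'
    rw [if_neg hgt]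
    simp only [hcm, hcM, ht]
  · rename_i hno
    exfalso
    exact hno M m (by rw [hM]) (by rw [hm])

theorem solve_master : ∀ (k : Nat) (bs s : List Int), bs ≠ [] → s.Perm bs →
    List.Pairwise (· ≤ ·) s → solveSpread (solveLoop k bs) = solveAltVal (solveAltLoop k s) := by
  intro k
  induction k using Nat.strong_induction_on with
  | _ k IH =>
    intro bs s hbs hperm hsort
    have hsne : s ≠ [] := by
      intro h0
      subst h0
      exact hbs (List.Perm.eq_nil hperm.symm)
    rcases Nat.eq_zero_or_pos k with rfl | hk
    · rw [show solveAltLoop 0 s = s from by rw [solveAltLoop]; simp]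
      rw [solveAltVal_sorted hsort hsne]
      exact (spread_perm hperm hbs).symm
    · by_cases hsp : s.getLast hsne - s.head hsne ≤ 1
      · rw [altLoop_stop hsne k hsp, solveAltVal_sorted hsort hsne]
        have hsps : solveSpread s ≤ 1 := by
          rw [spread_eq, maxV_sorted hsort hsne, minV_sorted hsort hsne]; exact hsp
        have hbsp : solveSpread bs ≤ 1 := by rw [← spread_perm hperm hbs]; exact hsps
        rw [loop_spread_le_one hbs hbsp k]
        exact (spread_perm hperm hbs).symm
      · -- recursive case
        have hneq : s.head hsne ≠ s.getLast hsne := by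
          intro h0; apply hsp; omega
        obtain ⟨mid, hseq, hmid, hmids, hlen⟩ := sorted_decomp hsort hsne hneq
        have hmM : s.head hsne + 2 ≤ s.getLast hsne := by
          have := sorted_le_getLast hsort hsne (List.head_mem hsne)
          omega
        obtain ⟨m, hm⟩ : ∃ x, s.head hsne = x := ⟨_, rfl⟩
        obtain ⟨M, hM⟩ : ∃ x, s.getLast hsne = x := ⟨_, rfl⟩
        rw [hm, hM] at hseq hmid hmM
        obtain ⟨cm, hcm⟩ : ∃ x, s.count m = x := ⟨_, rfl⟩
        obtain ⟨cM, hcM⟩ : ∃ x, s.count M = x := ⟨_, rfl⟩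
        rw [hm, hM, hcm, hcM] at hlen
        rw [hcm, hcM] at hseq
        have hcmpos : 0 < cm := by
          rw [← hcm]
          exact List.count_pos_iff.2 (hm ▸ List.head_mem hsne)
        have hcMpos : 0 < cM := by
          rw [← hcM]
          exact List.count_pos_iff.2 (hM ▸ List.getLast_mem hsne)
        set t := min k (min cm cM) with htdef
        have htpos : 0 < t := by omega
        have ht1 : t ≤ cm := by omega
        have ht2 : t ≤ cM := by omega
        have htk : t ≤ k := by omega
        -- B side: one batch
        have hBeq : solveAltLoop k s = solveAltLoop (k - t) (Su m M cm cM mid t) := by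
          rw [altLoop_unfold (by omega) (hm ▸ pyGet_head hsne) (hM ▸ pyGet_last hsne)
            (by omega) (by rw [PySem.List.count_eq]; exact hcm)
            (by rw [PySem.List.count_eq]; exact hcM) htdef.symm]
          congr 1
          conv_lhs => rw [hseq]
          exact update_eq_Su m M cm cM mid t ht1 ht2
        -- A side: unroll the batch, one step at a time
        have inner : ∀ j, j ≤ t → ∀ bs', bs' ≠ [] → bs'.Perm (Su m M cm cM mid (t - j)) →
            solveSpread (solveLoop (k - (t - j)) bs')
              = solveAltVal (solveAltLoop (k - t) (Su m M cm cM mid t)) := by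
          intro j
          induction j with
          | zero =>
            intro _ bs' hbs' hp'
            rw [Nat.sub_zero] at hp'
            exact IH (k - t) (by omega) bs' (Su m M cm cM mid t) hbs' hp'.symm
              (Su_sorted hmid hmids hmM)
          | succ j ihj =>
            intro hj bs' hbs' hp'
            have hu : t - (j + 1) < t := by omega
            have huc1 : t - (j + 1) < cm := by omega
            have huc2 : t - (j + 1) < cM := by omega
            have hSune : Su m M cm cM mid (t - (j + 1)) ≠ [] :=
              Su_ne_nil (by omega) (by omega) hcmpos
            have hminmax := Su_min_max (u := t - (j + 1)) hmid hmM huc1 huc2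
            have hmin : minV bs' = m := by
              rw [minV_perm hp' hSune]; exact hminmax.1
            have hmax : maxV bs' = M := by
              rw [maxV_perm hp' hSune]; exact hminmax.2
            have hsucc : t - (j + 1) + 1 = t - j := by omega
            have hstep : (solveStep bs').Perm (Su m M cm cM mid (t - j)) := by
              rw [List.perm_iff_count]
              intro c
              have h1 := step_count hbs' (by rw [hmax, hmin]; omega) c
              rw [hmax, hmin] at h1
              have h2 := Su_succ_count (m := m) (M := M) (cm := cm) (cM := cM) (mid := mid)
                (u := t - (j + 1)) (by omega) (by omega) c
              rw [hsucc] at h2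
              have h3 := List.perm_iff_count.1 hp' c
              split_ifs at h1 h2 <;> omega
            have hstepne : solveStep bs' ≠ [] := step_ne_nil hbs'
            have hkub : k - (t - (j + 1)) = (k - (t - j)) + 1 := by omega
            by_cases hb : solveSpread (solveStep bs') ≤ 1
            · -- the batch ends exactly here with spread ≤ 1
              have hSutne : Su m M cm cM mid (t - j) ≠ [] :=
                Su_ne_nil (by omega) (by omega) hcmpos
              have hspstep : solveSpread (solveStep bs')
                  = solveSpread (Su m M cm cM mid (t - j)) := spread_perm hstep hSutne
              have hjt : j = 0 := by
                by_contra hj0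
                have hlt : t - j < t := by omega
                have hmm := Su_min_max (cm := cm) (cM := cM) (mid := mid) (u := t - j)
                  hmid hmM (by omega) (by omega)
                have hx : solveSpread (Su m M cm cM mid (t - j)) = M - m := by
                  rw [spread_eq, hmm.2, hmm.1]
                rw [hx] at hspstep
                omega
              subst hjt
              rw [Nat.sub_zero] at hspstep hstep hSutne
              have hLA : solveLoop (k - (t - 1)) bs' = solveStep bs' := by
                rw [show k - (t - 1) = (k - t) + 1 from by omega, solveLoop]
                simp only [hb, if_pos]
              rw [hLA]
              have hsorted_t : List.Pairwise (· ≤ ·) (Su m M cm cM mid t) :=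
                Su_sorted hmid hmids hmM
              have hstopcond : (Su m M cm cM mid t).getLast hSutne -
                  (Su m M cm cM mid t).head hSutne ≤ 1 := by
                have := solveAltVal_sorted hsorted_t hSutne
                rw [← maxV_sorted hsorted_t hSutne, ← minV_sorted hsorted_t hSutne]
                rw [← spread_eq]
                omega
              rw [altLoop_stop hSutne (k - t) hstopcond]
              rw [solveAltVal_sorted hsorted_t hSutne]
              exact hspstep
            · -- spread still > 1: peel one step and recurse
              rw [hkub, loop_unfold hb]
              have := ihj (by omega) (solveStep bs') hstepne hstep
              rw [show k - (t - j) = k - (t - j) from rfl] at this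
              exact this
        have hfin := inner t le_rfl bs hbs (by rw [Nat.sub_self, ← hseq]; exact hperm.symm)
        rw [Nat.sub_self, Nat.sub_zero] at hfin
        rw [hBeq]
        exact hfin
-- ===== VERDICT (by name: the statement is the Claim_ definition above) =====
theorem solve_spec : Claim_equal_solve := by
  unfold Claim_equal_solve Spec_solve Pre_solve
  intro dc boxes _ hpre
  have hperm : (PySem.List.sorted boxes (fun x => x) false).Perm boxes :=
    PySem.List.sorted_perm ..
  have hsort : List.Pairwise (· ≤ ·) (PySem.List.sorted boxes (fun x => x) false) := by
    simpa using PySem.List.sorted_pairwise (xs := boxes) (key := fun x => x)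
  show solveSpread (solveLoop dc.toNat boxes)
      = solveAltVal (solveAltLoop dc.toNat (PySem.List.sorted boxes (fun x => x) false))
  exact solve_master dc.toNat boxes _ hpre hperm hsort
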